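-- pv_equiv track=rewrite | github.com/is4ac/cs839-data-science | featured_data_generator.py | capitalize_as_name
-- ===== SOURCE A (Python) =====
-- def capitalize_as_name(name):
--     capitalized_name = ""
--
--     for i in range(0, len(name)):
--         if i == 0:
--             capitalized_name += name[i]
--         else:
--             capitalized_name += name[i].lower()
--
--     return capitalized_name
-- ===== SOURCE B (Python) =====
-- def capitalize_as_name(name):
--     return name[:1] + name[1:].lower()
-- ===== Notes on version B (the rewrite author's own statement) =====
-- stated objective: idiomatic
-- what changed: Replaced the index loop with an accumulator and a per-index i==0 branch by a single closed-form expression: slice off the first character and lowercase the rest in one bulk call.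
import Mathlib
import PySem

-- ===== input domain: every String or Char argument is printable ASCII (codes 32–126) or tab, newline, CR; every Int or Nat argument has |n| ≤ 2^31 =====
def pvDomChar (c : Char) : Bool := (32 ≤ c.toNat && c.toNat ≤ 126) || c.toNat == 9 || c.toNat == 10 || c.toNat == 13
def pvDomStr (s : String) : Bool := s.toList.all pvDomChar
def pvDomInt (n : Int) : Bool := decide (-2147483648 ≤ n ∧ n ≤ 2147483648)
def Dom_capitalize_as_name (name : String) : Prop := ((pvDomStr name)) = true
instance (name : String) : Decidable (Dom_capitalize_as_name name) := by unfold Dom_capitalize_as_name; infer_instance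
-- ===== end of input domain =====

-- B replaces A's index loop (accumulator + i==0 branch) by the closed form name[:1] + name[1:].lower() — idiomatic.

-- ===== PORT A =====
-- A: accumulate characters over range(0, len(name)); at i == 0 append name[i], otherwise name[i].lower()
def capitalize_as_name (name : String) : String :=
  String.ofList <|
    (PySem.List.pyRange 0 (PySem.Str.len name) 1).foldl
      (fun acc i =>
        if i == 0 then
          acc ++ ((PySem.Str.pyGet? name i).map (fun c => [c])).getD []
        else
          acc ++ ((PySem.Str.pyGet? name i).map (fun c => [PySem.Chars.lowerChar c])).getD [])
      []

-- ===== PORT B =====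
-- B: name[:1] + name[1:].lower(), one slice + one bulk lower + one concatenation
def capitalize_as_name_alt (name : String) : String :=
  String.ofList
    (PySem.List.slice name.toList none (some 1) ++
     PySem.Chars.lower (PySem.List.slice name.toList (some 1) none))

-- ===== PRECONDITION & SPEC =====
def Spec_capitalize_as_name (name : String) (out : String) : Prop := out = capitalize_as_name_alt name
instance (name : String) (out : String) : Decidable (Spec_capitalize_as_name name out) := by unfold Spec_capitalize_as_name; infer_instance

-- ===== CLAIM (what is proved, stated in full; the proofs are below) =====
def Claim_equal_capitalize_as_name : Prop := ∀ (name : String), Dom_capitalize_as_name name → Spec_capitalize_as_name name (capitalize_as_name name)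

-- ===== LEMMAS AND PROOFS =====

-- first char kept, rest lowered — the shape both ports produce
def capFirst (xs : List Char) : List Char :=
  xs.take 1 ++ (xs.drop 1).map PySem.Chars.lowerChar

theorem capitalize_loop_eq (l : List Char) (n : Nat) (hn : n ≤ l.length) :
    (PySem.List.pyRange 0 (n : Int) 1).foldl
      (fun acc i =>
        if i == 0 then
          acc ++ ((PySem.List.pyGet? l i).map (fun c => [c])).getD []
        else
          acc ++ ((PySem.List.pyGet? l i).map (fun c => [PySem.Chars.lowerChar c])).getD [])
      []
    = capFirst (l.take n) := by
  induction n with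
  | zero => simp [PySem.List.pyRange, capFirst]
  | succ n ih =>
    have hlt : n < l.length := by omega
    have hcast : ((n + 1 : Nat) : Int) = (n : Int) + 1 := by push_cast; ring
    rw [hcast, PySem.List.pyRange_one_succ_right (by positivity), List.foldl_append,
        ih (by omega)]
    have hget : PySem.List.pyGet? l (n : Int) = some l[n] := by
      simp [PySem.List.pyGet?_natCast, List.getElem?_eq_getElem hlt]
    have htake : l.take (n + 1) = l.take n ++ [l[n]] := by
      rw [List.take_add_one, List.getElem?_eq_getElem hlt]; rfl
    simp only [List.foldl_cons, List.foldl_nil, hget, htake]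
    rcases Nat.eq_zero_or_pos n with h0 | hpos
    · subst h0; simp [capFirst]
    · have hne : ((n : Int) == 0) = false := by simp; omega
      have hlen : (l.take n).length = n := List.length_take_of_le (le_of_lt hlt)
      simp only [hne, Option.map_some, Option.getD_some, capFirst]
      rw [List.take_append_of_le_length (by omega), List.drop_append_of_le_length (by omega)]
      simp

-- ===== VERDICT (by name: the statement is the Claim_ definition above) =====
theorem capitalize_as_name_spec : Claim_equal_capitalize_as_name := by
  intro name _
  unfold Spec_capitalize_as_name capitalize_as_name capitalize_as_name_alt
  have h := capitalize_loop_eq name.toList name.toList.length le_rfl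
  simp only [List.take_length] at h
  have hfold : (PySem.List.pyRange 0 (PySem.Str.len name) 1).foldl
      (fun acc i =>
        if i == 0 then
          acc ++ ((PySem.Str.pyGet? name i).map (fun c => [c])).getD []
        else
          acc ++ ((PySem.Str.pyGet? name i).map (fun c => [PySem.Chars.lowerChar c])).getD [])
      []
      = capFirst name.toList := by
    rw [← h]
    simp [PySem.Str.len, PySem.Str.pyGet?]
  rw [hfold]
  have hs1 : PySem.List.slice name.toList none (some 1) = name.toList.take 1 := by
    simpa using PySem.List.slice_to_natCast (xs := name.toList) (b := 1)
  rw [hs1, PySem.List.slice_from_one]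
  have : PySem.Chars.lower name.toList.tail = name.toList.tail.map PySem.Chars.lowerChar := rfl
  rw [this]
  simp [capFirst, List.drop_one]
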